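-- pv_equiv track=rewrite | github.com/hongyesuifeng/python-algorithm | python-offer/question16.py | power_positive_exponent2
-- ===== SOURCE A (Python) =====
-- def power_positive_exponent2(base, exponent):
--     if exponent == 0:
--         return 1
--     if exponent == 1:
--         return base
--     result = power_positive_exponent2(base, exponent>>1)
--     result *= result
--     if exponent & 1 == 1:
--         result *= base
--     return result
-- ===== SOURCE B (Python) =====
-- def power_positive_exponent2(base, exponent):
--     if exponent == 0:
--         return 1
--     result = base
--     for i in range(exponent.bit_length() - 2, -1, -1):
--         result *= result
--         if (exponent >> i) & 1:
--             result *= base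
--     return result
-- ===== Notes on version B (the rewrite author's own statement) =====
-- stated objective: alternative
-- what changed: Replaced A's top-down recursion on exponent>>1 by an iterative exponentiation-by-squaring loop that walks the exponent's bits from most-significant to least-significant, starting result = base at the top bit.
-- outside the precondition, e.g. on power_positive_exponent2(2, -3): A raises RecursionError, B returns 8
import Mathlib
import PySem

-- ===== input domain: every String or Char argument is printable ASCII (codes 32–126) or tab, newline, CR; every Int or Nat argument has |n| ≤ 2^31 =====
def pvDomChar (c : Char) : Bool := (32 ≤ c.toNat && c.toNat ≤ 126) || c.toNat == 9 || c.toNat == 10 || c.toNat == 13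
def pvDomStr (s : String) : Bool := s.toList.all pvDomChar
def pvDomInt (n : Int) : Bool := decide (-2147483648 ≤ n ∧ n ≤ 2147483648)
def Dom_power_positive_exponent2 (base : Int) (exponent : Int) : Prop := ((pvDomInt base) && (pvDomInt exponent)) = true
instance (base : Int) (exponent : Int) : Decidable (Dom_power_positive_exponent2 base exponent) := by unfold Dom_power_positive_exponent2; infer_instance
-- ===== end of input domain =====

-- B replaces A's top-down recursion on exponent>>1 by an iterative MSB→LSB binary-exponentiation loop over the exponent's bits; objective: alternative decomposition (same exact values, no recursion).

-- ===== PORT A =====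
-- A recurses on exponent>>1; the fuel parameter only bounds that recursion (never
-- exhausted when 0 ≤ exponent, since exponent>>1 strictly decreases there).
def powerA (fuel : Nat) (base : Int) (exponent : Int) : Int :=
  match fuel with
  | 0 => 1  -- unreachable for 0 ≤ exponent with fuel = exponent.toNat + 1
  | fuel + 1 =>
    if exponent = 0 then 1
    else if exponent = 1 then base
    else
      let result := powerA fuel base (exponent >>> (1 : Nat))
      let result := result * result
      if PySem.Int.band exponent 1 = 1 then result * base else result

def power_positive_exponent2 (base : Int) (exponent : Int) : Int :=
  powerA (exponent.toNat + 1) base exponent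

-- ===== PORT B =====
-- Source B: result = base, then for i from exponent.bit_length()-2 down to 0:
-- square, and multiply by base when bit i of exponent is set.
def power_positive_exponent2_alt (base : Int) (exponent : Int) : Int :=
  if exponent = 0 then 1
  else
    ((List.range (PySem.Int.bitLength exponent - 1)).reverse).foldl
      (fun (result : Int) (i : Nat) =>
        let result := result * result
        if PySem.Int.band (exponent >>> i) 1 = 1 then result * base else result)
      base

-- ===== PRECONDITION & SPEC =====
-- A recurses forever (RecursionError) on negative exponents, so Pre_ admits exactly
-- the exponents on which the Python A returns.
def Pre_power_positive_exponent2 (base : Int) (exponent : Int) : Prop := 0 ≤ exponent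
instance (base : Int) (exponent : Int) : Decidable (Pre_power_positive_exponent2 base exponent) := by unfold Pre_power_positive_exponent2; infer_instance
def pvWitness_power_positive_exponent2 : Int × Int := (3, 5)

def Spec_power_positive_exponent2 (base : Int) (exponent : Int) (out : Int) : Prop := out = power_positive_exponent2_alt base exponent
instance (base : Int) (exponent : Int) (out : Int) : Decidable (Spec_power_positive_exponent2 base exponent out) := by unfold Spec_power_positive_exponent2; infer_instance

-- ===== CLAIM (what is proved, stated in full; the proofs are below) =====
def Claim_equal_power_positive_exponent2 : Prop := ∀ (base : Int) (exponent : Int), Dom_power_positive_exponent2 base exponent → Pre_power_positive_exponent2 base exponent → Spec_power_positive_exponent2 base exponent (power_positive_exponent2 base exponent)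

-- ===== LEMMAS AND PROOFS =====

-- bit i of a nonnegative exponent, as the Python test (e >> i) & 1 == 1 computes it
lemma band_bit (e : Int) (h : 0 ≤ e) (k : Nat) :
    PySem.Int.band (e >>> k) 1 = 1 ↔ e.toNat / 2 ^ k % 2 = 1 := by
  have h1 : e = ((e.toNat : Nat) : Int) := by omega
  have h2 : ((e.toNat : Nat) : Int) >>> k = ((e.toNat >>> k : Nat) : Int) :=
    Int.mem_toNat?.mp rfl
  have h3 : PySem.Int.band ((e.toNat >>> k : Nat) : Int) 1 = (((e.toNat >>> k) &&& 1 : Nat) : Int) := by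
    exact_mod_cast PySem.Int.band_natCast _ 1
  rw [h1, h2, h3, show ((1:Int)) = ((1:Nat):Int) from rfl, Nat.cast_inj,
    Nat.and_one_is_mod, Nat.shiftRight_eq_div_pow]
  simp only [Int.toNat_natCast]

-- A computes base ^ exponent.toNat whenever the fuel covers the exponent
lemma powerA_eq (base : Int) : ∀ (fuel : Nat) (exponent : Int), 0 ≤ exponent → exponent.toNat < fuel →
    powerA fuel base exponent = base ^ exponent.toNat := by
  intro fuel
  induction fuel with
  | zero => intro e he h; omega
  | succ f ih =>
    intro e he h
    unfold powerA
    by_cases h0 : e = 0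
    · simp [h0]
    · by_cases h1 : e = 1
      · simp [h1]
      · have he2 : (2:Int) ≤ e := by omega
        have hs : e >>> (1 : Nat) = ((e.toNat / 2 : Nat) : Int) := by
          have h1 : e = ((e.toNat : Nat) : Int) := by omega
          have h2 : ((e.toNat : Nat) : Int) >>> (1:Nat) = ((e.toNat >>> 1 : Nat) : Int) :=
            Int.mem_toNat?.mp rfl
          rw [h1, h2, Nat.shiftRight_eq_div_pow]
          norm_num
        have hrec := ih (e >>> (1 : Nat)) (by rw [hs]; positivity) (by rw [hs]; simp; omega)
        rw [if_neg h0, if_neg h1]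
        simp only [hs] at hrec ⊢
        rw [hrec]
        have hbit := band_bit e he 0
        simp only [pow_zero, Nat.div_one] at hbit
        have hb0 : PySem.Int.band e 1 = PySem.Int.band (e >>> (0:Nat)) 1 := by norm_num
        have hcast : ((e.toNat / 2 : Nat) : Int).toNat = e.toNat / 2 := by omega
        rw [hcast]
        by_cases hodd : PySem.Int.band e 1 = 1
        · rw [if_pos hodd]
          have hm : e.toNat % 2 = 1 := by
            have := hbit.mp (by rw [← hb0]; exact hodd)
            omega
          rw [← pow_add, ← pow_succ]
          congr 1
          omega
        · rw [if_neg hodd]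
          have hm : e.toNat % 2 = 0 := by
            by_contra hc
            exact hodd (by rw [hb0]; exact hbit.mpr (by omega))
          rw [← pow_add]
          congr 1
          omega

-- B's loop invariant: starting from base ^ m, processing bits k-1 … 0 of the
-- exponent multiplies the exponent of the accumulator by 2^k and adds the low k bits
lemma altLoop (base : Int) (e : Int) (he : 0 ≤ e) : ∀ (k m : Nat),
    ((List.range k).reverse).foldl
      (fun (result : Int) (i : Nat) =>
        if PySem.Int.band (e >>> i) 1 = 1 then result * result * base else result * result)
      (base ^ m)
    = base ^ (m * 2 ^ k + e.toNat % 2 ^ k) := by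
  intro k
  induction k with
  | zero => intro m; simp [Nat.mod_one]
  | succ k ih =>
    intro m
    rw [List.range_succ, List.reverse_append, List.reverse_singleton,
      List.singleton_append, List.foldl_cons]
    have hmod : e.toNat % 2 ^ (k + 1) = e.toNat % 2 ^ k + 2 ^ k * (e.toNat / 2 ^ k % 2) := by
      rw [pow_succ, Nat.mod_mul]
    by_cases hodd : PySem.Int.band (e >>> k) 1 = 1
    · simp only [hodd, if_pos]
      have hpow : base ^ m * base ^ m * base = base ^ (m + m + 1) := by ring
      rw [hpow, ih (m + m + 1)]
      congr 1
      have hb : e.toNat / 2 ^ k % 2 = 1 := (band_bit e he k).mp hodd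
      rw [hmod, hb]; ring
    · simp only [hodd, reduceIte]
      have hpow : base ^ m * base ^ m = base ^ (m + m) := by ring
      rw [hpow, ih (m + m)]
      congr 1
      have hb : e.toNat / 2 ^ k % 2 = 0 := by
        have := (band_bit e he k)
        have h2 : e.toNat / 2 ^ k % 2 = 1 → False := fun hx => hodd (this.mpr hx)
        omega
      rw [hmod, hb]; ring

-- B also computes base ^ exponent.toNat
lemma alt_eq (base : Int) (exponent : Int) (he : 0 ≤ exponent) :
    power_positive_exponent2_alt base exponent = base ^ exponent.toNat := by
  unfold power_positive_exponent2_alt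
  by_cases h0 : exponent = 0
  · simp [h0]
  · rw [if_neg h0]
    have hpos : 0 < exponent := by omega
    show ((List.range (PySem.Int.bitLength exponent - 1)).reverse).foldl
      (fun (result : Int) (i : Nat) =>
        if PySem.Int.band (exponent >>> i) 1 = 1 then result * result * base else result * result)
      base = base ^ exponent.toNat
    have hl := altLoop base exponent he (PySem.Int.bitLength exponent - 1) 1
    rw [pow_one] at hl
    rw [hl]
    congr 1
    have h1 := PySem.Int.two_pow_bitLength_le exponent (by omega)
    have h2 := PySem.Int.lt_two_pow_bitLength exponent
    have hna : exponent.natAbs = exponent.toNat := by omega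
    rw [hna] at h1 h2
    have hblpos : 1 ≤ PySem.Int.bitLength exponent := by
      by_contra hc
      have : PySem.Int.bitLength exponent = 0 := by omega
      rw [this] at h2; simp at h2; omega
    have h3 : 2 ^ PySem.Int.bitLength exponent = 2 ^ (PySem.Int.bitLength exponent - 1) * 2 := by
      rw [← pow_succ]; congr 1; omega
    have h4 : exponent.toNat % 2 ^ (PySem.Int.bitLength exponent - 1)
        = exponent.toNat - 2 ^ (PySem.Int.bitLength exponent - 1) := by
      rw [Nat.mod_eq_sub_mod h1, Nat.mod_eq_of_lt (by omega)]
    omega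

-- ===== VERDICT (by name: the statement is the Claim_ definition above) =====
theorem power_positive_exponent2_spec : Claim_equal_power_positive_exponent2 := by
  intro base exponent _ hpre
  unfold Spec_power_positive_exponent2
  rw [alt_eq base exponent hpre]
  unfold power_positive_exponent2
  exact powerA_eq base _ exponent hpre (by omega)
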